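-- pv_equiv track=rewrite | github.com/DiveFish/SORTS | scripts/conll2conll_fixer.py | extract_order_and_props
-- ===== SOURCE A (Python) =====
-- def extract_order_and_props(feats):
--     """Extract 'order' and 'props' from FEATS column."""
--     order = None
--     props = None
--     for feat in feats.split('|'):
--         if feat.startswith('order:'):
--             order = feat[len('order:'):]
--         elif feat.startswith('props:'):
--             props = feat[len('props:'):]
--     return order, props
-- ===== SOURCE B (Python) =====
-- def extract_order_and_props(feats):
--     """Extract 'order' and 'props' from FEATS column."""
--     parsed = {}
--     for feat in feats.split('|'):
--         key, sep, value = feat.partition(':')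
--         if sep:
--             parsed[key] = value
--     return parsed.get('order'), parsed.get('props')
-- ===== Notes on version B (the rewrite author's own statement) =====
-- stated objective: idiomatic
-- what changed: B parses every colon-separated feature into a dict in one pass (partition at the first colon, later duplicates overwrite) and then extracts the two requested fields by dict lookup, instead of branching on two hardcoded prefixes inside the loop.
import Mathlib
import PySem

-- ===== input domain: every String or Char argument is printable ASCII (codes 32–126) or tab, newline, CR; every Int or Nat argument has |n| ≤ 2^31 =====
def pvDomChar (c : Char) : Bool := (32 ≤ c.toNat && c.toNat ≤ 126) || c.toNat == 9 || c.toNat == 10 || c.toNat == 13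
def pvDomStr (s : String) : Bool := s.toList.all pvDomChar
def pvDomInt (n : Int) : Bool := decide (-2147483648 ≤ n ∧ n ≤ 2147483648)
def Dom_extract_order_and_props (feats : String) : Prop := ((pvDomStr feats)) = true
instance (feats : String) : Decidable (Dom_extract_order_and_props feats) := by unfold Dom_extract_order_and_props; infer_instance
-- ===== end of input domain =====

-- B builds a dict of all colon-separated features (partition at the first colon,
-- later duplicates overwrite) and then extracts the two fields by dict lookup,
-- instead of A's hardcoded prefix tests inside the loop; same cost, more idiomatic.

-- ===== PORT A =====
-- loop body of A: prefix tests on each feature, last match wins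
def pvStepA (st : Option String × Option String) (feat : List Char) : Option String × Option String :=
  if PySem.Chars.startswith feat ("order:".toList) then
    (some (String.ofList (PySem.List.slice feat (some 6) none)), st.2)
  else if PySem.Chars.startswith feat ("props:".toList) then
    (st.1, some (String.ofList (PySem.List.slice feat (some 6) none)))
  else st

def extract_order_and_props (feats : String) : Option String × Option String :=
  (PySem.Chars.splitOn feats.toList ['|']).foldl pvStepA (none, none)

-- ===== PORT B =====
-- loop body of B: feat.partition(':') ported by hand as takeWhile/dropWhile at the
-- first ':' (exact: str.partition splits at the first occurrence; empty sep = no colon, no insert)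
def pvStepB (d : PySem.Dict String String) (feat : List Char) : PySem.Dict String String :=
  match feat.dropWhile (fun c => c ≠ ':') with
  | [] => d
  | _ :: v => d.insert (String.ofList (feat.takeWhile (fun c => c ≠ ':'))) (String.ofList v)

def extract_order_and_props_alt (feats : String) : Option String × Option String :=
  let parsed := (PySem.Chars.splitOn feats.toList ['|']).foldl pvStepB PySem.Dict.empty
  (parsed.get? "order", parsed.get? "props")

-- ===== PRECONDITION & SPEC =====
def Spec_extract_order_and_props (feats : String) (out : Option String × Option String) : Prop := out = extract_order_and_props_alt feats
instance (feats : String) (out : Option String × Option String) : Decidable (Spec_extract_order_and_props feats out) := by unfold Spec_extract_order_and_props; infer_instance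

-- ===== CLAIM (what is proved, stated in full; the proofs are below) =====
def Claim_equal_extract_order_and_props : Prop := ∀ (feats : String), Dom_extract_order_and_props feats → Spec_extract_order_and_props feats (extract_order_and_props feats)

-- ===== LEMMAS AND PROOFS =====

lemma pv_prefix_colon (key k : List Char) (v : List Char)
    (hkey : ∀ c ∈ key, c ≠ ':') (hk : ∀ c ∈ k, c ≠ ':') :
    (key ++ [':'] <+: k ++ ':' :: v) ↔ key = k := by
  induction key generalizing k with
  | nil =>
    cases k with
    | nil => simp
    | cons b k' =>
      constructor
      · rintro ⟨t, ht⟩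
        have hb : b = ':' := by
          have := congrArg (fun l => l.head?) ht
          simpa using this.symm
        exact absurd hb (hk b (by simp))
      · intro h; exact absurd h (by simp)
  | cons a key' ih =>
    cases k with
    | nil =>
      constructor
      · rintro ⟨t, ht⟩
        have ha : a = ':' := by
          have := congrArg (fun l => l.head?) ht
          simpa using this
        exact absurd ha (hkey a (by simp))
      · intro h; exact absurd h (by simp)
    | cons b k' =>
      simp only [List.cons_append, List.cons_prefix_cons, List.cons.injEq]
      constructor
      · rintro ⟨hab, hpre⟩
        exact ⟨hab, (ih k' (fun c hc => hkey c (by simp [hc])) (fun c hc => hk c (by simp [hc]))).mp hpre⟩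
      · rintro ⟨hab, hrest⟩
        exact ⟨hab, (ih k' (fun c hc => hkey c (by simp [hc])) (fun c hc => hk c (by simp [hc]))).mpr hrest⟩

lemma pv_takeWhile_ne (feat : List Char) :
    ∀ c ∈ feat.takeWhile (fun c => c ≠ ':'), c ≠ ':' := by
  intro c hc
  have := List.mem_takeWhile_imp hc
  simpa using this

lemma pv_partition_eq (feat : List Char) (c : Char) (v : List Char)
    (hdw : feat.dropWhile (fun c => c ≠ ':') = c :: v) :
    feat = feat.takeWhile (fun c => c ≠ ':') ++ ':' :: v := by
  have hc : c = ':' := by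
    have h0 : ∀ (w : feat.dropWhile (fun c => c ≠ ':') ≠ []),
        ((feat.dropWhile (fun c => c ≠ ':')).head w = ':') := by
      intro w
      have := List.head_dropWhile_not (p := fun c => c ≠ ':') (l := feat) w
      simpa using this
    have := h0 (by rw [hdw]; exact List.cons_ne_nil c v)
    rw [List.head_eq_iff_head?_eq_some] at this
    rw [hdw] at this
    simpa using this
  conv_lhs => rw [← List.takeWhile_append_dropWhile (p := fun c => c ≠ ':') (l := feat)]
  rw [hdw, hc]

lemma pv_startswith_iff (key : List Char) (hkey : ∀ c ∈ key, c ≠ ':')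
    (feat : List Char) (c : Char) (v : List Char)
    (hdw : feat.dropWhile (fun c => c ≠ ':') = c :: v) :
    PySem.Chars.startswith feat (key ++ [':']) = true ↔ feat.takeWhile (fun c => c ≠ ':') = key := by
  rw [PySem.Chars.startswith_iff]
  conv_lhs => rw [pv_partition_eq feat c v hdw]
  rw [pv_prefix_colon key _ v hkey (pv_takeWhile_ne feat)]
  exact ⟨Eq.symm, Eq.symm⟩

lemma pv_startswith_none (key : List Char) (feat : List Char)
    (hdw : feat.dropWhile (fun c => c ≠ ':') = []) :
    PySem.Chars.startswith feat (key ++ [':']) = false := by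
  have hall : ∀ c ∈ feat, c ≠ ':' := by
    intro c hc
    have := (List.dropWhile_eq_nil_iff).mp hdw c hc
    simpa using this
  by_contra h
  have h' : PySem.Chars.startswith feat (key ++ [':']) = true := by
    cases hb : PySem.Chars.startswith feat (key ++ [':']) with
    | false => exact absurd hb h
    | true => rfl
  have hpre := (PySem.Chars.startswith_iff feat (key ++ [':'])).mp h'
  exact hall ':' (hpre.mem (by simp)) rfl

lemma pv_step (st : Option String × Option String) (d : PySem.Dict String String)
    (h1 : d.get? "order" = st.1) (h2 : d.get? "props" = st.2) (feat : List Char) :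
    (pvStepB d feat).get? "order" = (pvStepA st feat).1 ∧
    (pvStepB d feat).get? "props" = (pvStepA st feat).2 := by
  have eo : ("order:".toList) = ['o','r','d','e','r'] ++ [':'] := by decide
  have ep : ("props:".toList) = ['p','r','o','p','s'] ++ [':'] := by decide
  unfold pvStepA pvStepB
  rw [eo, ep]
  cases hdw : feat.dropWhile (fun c => c ≠ ':') with
  | nil =>
    rw [pv_startswith_none ['o','r','d','e','r'] feat hdw,
        pv_startswith_none ['p','r','o','p','s'] feat hdw]
    simp [h1, h2]
  | cons c v =>
    have ho := pv_startswith_iff ['o','r','d','e','r']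
      (by intro x hx; simp at hx; rcases hx with h|h|h|h|h <;> subst h <;> decide) feat c v hdw
    have hp := pv_startswith_iff ['p','r','o','p','s']
      (by intro x hx; simp at hx; rcases hx with h|h|h|h|h <;> subst h <;> decide) feat c v hdw
    have hfeat := pv_partition_eq feat c v hdw
    by_cases hko : feat.takeWhile (fun c => c ≠ ':') = ['o','r','d','e','r']
    · have hso := ho.mpr hko
      have hsp : PySem.Chars.startswith feat (['p','r','o','p','s'] ++ [':']) = false := by
        cases hb : PySem.Chars.startswith feat (['p','r','o','p','s'] ++ [':']) with
        | false => rfl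
        | true => exact absurd (hko ▸ hp.mp hb) (by intro h; injection h with h1 _; exact absurd h1 (by decide))
      have hsl : PySem.List.slice feat (some 6) none = v := by
        rw [PySem.List.slice_from feat (by norm_num)]
        conv_lhs => rw [hfeat, hko]
        simp
      rw [hso, hsp]
      have hko' : List.takeWhile (fun c => !decide (c = ':')) feat = ['o','r','d','e','r'] := by
        simpa using hko
      simp [hko', hsl, PySem.Dict.get?_insert, h2]
    · by_cases hkp : feat.takeWhile (fun c => c ≠ ':') = ['p','r','o','p','s']
      · have hsp := hp.mpr hkp
        have hso : PySem.Chars.startswith feat (['o','r','d','e','r'] ++ [':']) = false := by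
          cases hb : PySem.Chars.startswith feat (['o','r','d','e','r'] ++ [':']) with
          | false => rfl
          | true => exact absurd (ho.mp hb) hko
        have hsl : PySem.List.slice feat (some 6) none = v := by
          rw [PySem.List.slice_from feat (by norm_num)]
          conv_lhs => rw [hfeat, hkp]
          simp
        rw [hso, hsp]
        have hkp' : List.takeWhile (fun c => !decide (c = ':')) feat = ['p','r','o','p','s'] := by
          simpa using hkp
        simp [hkp', hsl, PySem.Dict.get?_insert, h1]
      · have hso : PySem.Chars.startswith feat (['o','r','d','e','r'] ++ [':']) = false := by
          cases hb : PySem.Chars.startswith feat (['o','r','d','e','r'] ++ [':']) with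
          | false => rfl
          | true => exact absurd (ho.mp hb) hko
        have hsp : PySem.Chars.startswith feat (['p','r','o','p','s'] ++ [':']) = false := by
          cases hb : PySem.Chars.startswith feat (['p','r','o','p','s'] ++ [':']) with
          | false => rfl
          | true => exact absurd (hp.mp hb) hkp
        have hne_o : ("order" : String) ≠ String.ofList (feat.takeWhile (fun c => c ≠ ':')) := by
          intro h
          exact hko (by simpa using (congrArg String.toList h).symm)
        have hne_p : ("props" : String) ≠ String.ofList (feat.takeWhile (fun c => c ≠ ':')) := by
          intro h
          exact hkp (by simpa using (congrArg String.toList h).symm)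
        rw [hso, hsp]
        simp only [Bool.false_eq_true, if_false]
        constructor
        · rw [PySem.Dict.get?_insert, if_neg hne_o]; exact h1
        · rw [PySem.Dict.get?_insert, if_neg hne_p]; exact h2

-- the loop invariant, by induction on the feature list
lemma pv_fold (xs : List (List Char)) (st : Option String × Option String)
    (d : PySem.Dict String String)
    (h1 : d.get? "order" = st.1) (h2 : d.get? "props" = st.2) :
    xs.foldl pvStepA st =
      ((xs.foldl pvStepB d).get? "order", (xs.foldl pvStepB d).get? "props") := by
  induction xs generalizing st d with
  | nil => simp only [List.foldl_nil]; rw [h1, h2]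
  | cons feat rest ih =>
    simp only [List.foldl_cons]
    exact ih (pvStepA st feat) (pvStepB d feat)
      (pv_step st d h1 h2 feat).1 (pv_step st d h1 h2 feat).2

-- ===== VERDICT (by name: the statement is the Claim_ definition above) =====
theorem extract_order_and_props_spec : Claim_equal_extract_order_and_props := by
  intro feats _
  unfold Spec_extract_order_and_props extract_order_and_props extract_order_and_props_alt
  exact pv_fold _ (none, none) PySem.Dict.empty (by simp) (by simp)
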